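-- pv_equiv track=rewrite | github.com/sjhaque14/steinberg-signature | .ipynb_checkpoints/general_graph_utils_main-checkpoint.py | get_cycle_labels_edges
-- ===== SOURCE A (Python) =====
-- def get_cycle_labels_edges(cycle_list,label_dict):
--     """
--     Compartmentalizes, for each cycle, the edges involved and their respective edge labels into separate data structures.
--
--     Parameters
--     ----------
--     cycle_list : list of lists
--         each element is a list of the nodes connected in a given cycle.
--
--     label_dict : dictionary
--         keys: edges in G represented as tuple (source,sink), values: edge labels
--
--     Returns
--     -------
--     cycle_edges_forward : list of lists
--         each element is a list of the edges going around one direction of a given cycle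
--
--     cycle_edges_backward : list of lists
--         each element is a list of the edges going around the opposite direction of a given cycle
--
--     cycle_labels_forward : list of lists
--         each element is a list of the labels going around one direction of a given cycle
--
--     cycle_labels_backward : list of lists
--         each element is a list of the labels going around the opposite direction of a given cycle
--
--     """
--
--     # define number of cycles
--     num_cycles = len(cycle_list)
--
--     # define arrays for edges in each direction
--     cycle_edges_forward = [[] for i in range(num_cycles)]
--     cycle_edges_backward = [[] for i in range(num_cycles)]
--
--     # define arrays for labels in each direction
--     cycle_labels_forward = [[] for i in range(num_cycles)]
--     cycle_labels_backward = [[] for i in range(num_cycles)]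
--
--     # iterate over each cycle
--     for j in range(num_cycles):
--
--         # for each node in the cycle
--         for i in range(1,len(cycle_list[j])):
--
--             # identify what it is connected to
--             source = cycle_list[j][i-1]
--             sink = cycle_list[j][i]
--
--             # edge (source,sink) and accompanying labels
--             cycle_labels_forward[j].append(label_dict.get((source,sink)))
--             cycle_edges_forward[j].append((source,sink))
--
--             #edge (sink, source) and accompanying labels
--             cycle_labels_backward[j].append(label_dict.get((sink,source)))
--             cycle_edges_backward[j].append((sink,source))
--
--         # account for the connection between the last and first elements of each cycle list
--         final_source = cycle_list[j][-1]
--         final_sink = cycle_list[j][0]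
--
--         # edge (final_source, final_sink) and accompanying labels
--         cycle_labels_forward[j].append(label_dict.get((final_source,final_sink)))
--         cycle_edges_forward[j].append((final_source,final_sink))
--
--         # edge (final_sink, final source) and accompanying labels
--         cycle_labels_backward[j].append(label_dict.get((final_sink,final_source)))
--         cycle_edges_backward[j].append((final_sink,final_source))
--
--     return cycle_edges_forward, cycle_edges_backward, cycle_labels_forward, cycle_labels_backward
-- ===== SOURCE B (Python) =====
-- def get_cycle_labels_edges(cycle_list, label_dict):
--     def cycle_edges(first, rest):
--         # recursively pair consecutive nodes; the last node closes back to the first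
--         if len(rest) == 1:
--             return [(rest[0], first)]
--         return [(rest[0], rest[1])] + cycle_edges(first, rest[1:])
--
--     # stage 1: forward edges per cycle, built recursively
--     cycle_edges_forward = [cycle_edges(c[0], c) for c in cycle_list]
--     # stage 2: backward edges derived by swapping each forward edge
--     cycle_edges_backward = [[(b, a) for (a, b) in fwd] for fwd in cycle_edges_forward]
--     # stages 3/4: labels looked up over the already-built edge structures
--     cycle_labels_forward = [[label_dict.get(e) for e in fwd] for fwd in cycle_edges_forward]
--     cycle_labels_backward = [[label_dict.get(e) for e in bwd] for bwd in cycle_edges_backward]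
--     return cycle_edges_forward, cycle_edges_backward, cycle_labels_forward, cycle_labels_backward
-- ===== Notes on version B (the rewrite author's own statement) =====
-- stated objective: alternative
-- what changed: B replaces A's four-list lockstep index loop (with a special-cased last-to-first edge) by a recursive per-cycle edge constructor that closes back to the carried first node, followed by three separate derivation passes: backward edges by swapping the forward list, and both label lists by mapping the dict lookup over the already-built edge structures.
import Mathlib
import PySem

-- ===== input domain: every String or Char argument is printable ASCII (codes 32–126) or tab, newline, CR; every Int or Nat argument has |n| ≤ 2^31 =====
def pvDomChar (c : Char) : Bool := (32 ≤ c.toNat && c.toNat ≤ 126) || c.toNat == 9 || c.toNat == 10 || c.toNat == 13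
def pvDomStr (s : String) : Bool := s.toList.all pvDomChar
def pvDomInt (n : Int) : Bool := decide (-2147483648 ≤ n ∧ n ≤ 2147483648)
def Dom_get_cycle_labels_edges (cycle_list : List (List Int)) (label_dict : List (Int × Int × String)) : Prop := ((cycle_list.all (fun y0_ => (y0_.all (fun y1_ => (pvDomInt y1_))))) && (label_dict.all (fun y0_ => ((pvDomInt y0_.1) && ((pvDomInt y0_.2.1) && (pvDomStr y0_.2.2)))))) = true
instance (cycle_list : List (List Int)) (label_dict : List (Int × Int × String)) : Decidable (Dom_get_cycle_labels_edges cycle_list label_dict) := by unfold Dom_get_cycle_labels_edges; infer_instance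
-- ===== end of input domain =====

-- B builds each cycle's forward edges with a recursive constructor carrying the first node (no
-- special-cased last-to-first edge) and then derives backward edges and both label lists in
-- separate staged passes, instead of A's four-list lockstep index loop; objective: alternative.

-- dict.get on the (source,sink)-keyed label dictionary (assoc list, first match)
def pvDget (d : List (Int × Int × String)) (k : Int × Int) : Option String :=
  (d.find? (fun e => e.1 == k.1 && e.2.1 == k.2)).map (fun e => e.2.2)

-- ===== PORT A =====
def get_cycle_labels_edges (cycle_list : List (List Int)) (label_dict : List (Int × Int × String)) : (List (List (Int × Int))) × (List (List (Int × Int))) × List (List (Option String)) × List (List (Option String)) :=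
  (PySem.List.pyRange 0 (cycle_list.length : Int) 1).foldl
    (fun acc j =>
      let c := PySem.List.pyGetD cycle_list j []
      let inner :=
        (PySem.List.pyRange 1 (c.length : Int) 1).foldl
          (fun (acc2 : List (Int × Int) × List (Int × Int) × List (Option String) × List (Option String)) i =>
            let source := PySem.List.pyGetD c (i - 1) 0
            let sink := PySem.List.pyGetD c i 0
            (acc2.1 ++ [(source, sink)], acc2.2.1 ++ [(sink, source)],
             acc2.2.2.1 ++ [pvDget label_dict (source, sink)],
             acc2.2.2.2 ++ [pvDget label_dict (sink, source)]))
          ([], [], [], [])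
      let fs := PySem.List.pyGetD c (-1) 0
      let fk := PySem.List.pyGetD c 0 0
      (acc.1 ++ [inner.1 ++ [(fs, fk)]],
       acc.2.1 ++ [inner.2.1 ++ [(fk, fs)]],
       acc.2.2.1 ++ [inner.2.2.1 ++ [pvDget label_dict (fs, fk)]],
       acc.2.2.2 ++ [inner.2.2.2 ++ [pvDget label_dict (fk, fs)]]))
    ([], [], [], [])

-- ===== PORT B =====
-- recursive helper cycle_edges(first, rest) of Source B; the [] case is unreachable in Source B
-- (Python would raise there), any value is fine outside Pre_
def pvCycleEdges (first : Int) : List Int → List (Int × Int)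
  | [] => []
  | [x] => [(x, first)]
  | x :: y :: rest => [(x, y)] ++ pvCycleEdges first (y :: rest)

def get_cycle_labels_edges_alt (cycle_list : List (List Int)) (label_dict : List (Int × Int × String)) : (List (List (Int × Int))) × (List (List (Int × Int))) × List (List (Option String)) × List (List (Option String)) :=
  let fwd := cycle_list.map (fun c => pvCycleEdges (PySem.List.pyGetD c 0 0) c)
  let bwd := fwd.map (fun l => l.map (fun e => (e.2, e.1)))
  (fwd, bwd,
   fwd.map (fun l => l.map (pvDget label_dict)),
   bwd.map (fun l => l.map (pvDget label_dict)))

-- ===== PRECONDITION & SPEC =====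
-- Pre_ excludes exactly the inputs where A raises IndexError: any cycle_list containing an empty cycle
def Pre_get_cycle_labels_edges (cycle_list : List (List Int)) (label_dict : List (Int × Int × String)) : Prop :=
  ∀ c ∈ cycle_list, c ≠ []
instance (cycle_list : List (List Int)) (label_dict : List (Int × Int × String)) : Decidable (Pre_get_cycle_labels_edges cycle_list label_dict) := by unfold Pre_get_cycle_labels_edges; infer_instance

def pvWitness_get_cycle_labels_edges : List (List Int) × (List (Int × Int × String)) :=
  ([[1, 2, 3], [2, 3]], [(1, 2, "a"), (2, 1, "b"), (3, 1, "c")])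

def Spec_get_cycle_labels_edges (cycle_list : List (List Int)) (label_dict : List (Int × Int × String)) (out : (List (List (Int × Int))) × (List (List (Int × Int))) × List (List (Option String)) × List (List (Option String))) : Prop := out = get_cycle_labels_edges_alt cycle_list label_dict
instance (cycle_list : List (List Int)) (label_dict : List (Int × Int × String)) (out : (List (List (Int × Int))) × (List (List (Int × Int))) × List (List (Option String)) × List (List (Option String))) : Decidable (Spec_get_cycle_labels_edges cycle_list label_dict out) := by
  unfold Spec_get_cycle_labels_edges
  have d1 : DecidableEq (List (List (Int × Int))) := inferInstance
  have d3 : DecidableEq (List (List (Option String))) := inferInstance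
  exact @instDecidableEqProd _ _ d1 (@instDecidableEqProd _ _ d1 (@instDecidableEqProd _ _ d3 d3)) out (get_cycle_labels_edges_alt cycle_list label_dict)

-- ===== CLAIM (what is proved, stated in full; the proofs are below) =====
def Claim_equal_get_cycle_labels_edges : Prop := ∀ (cycle_list : List (List Int)) (label_dict : List (Int × Int × String)), Dom_get_cycle_labels_edges cycle_list label_dict → Pre_get_cycle_labels_edges cycle_list label_dict → Spec_get_cycle_labels_edges cycle_list label_dict (get_cycle_labels_edges cycle_list label_dict)

-- ===== LEMMAS AND PROOFS =====

-- let-free proof-side renderings of A's inner loop and of A's outer loop body (defeq to the port)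
def pvAInner (d : List (Int × Int × String)) (c : List Int) : List (Int × Int) × List (Int × Int) × List (Option String) × List (Option String) :=
  (PySem.List.pyRange 1 (c.length : Int) 1).foldl
    (fun acc2 i =>
      (acc2.1 ++ [(PySem.List.pyGetD c (i - 1) 0, PySem.List.pyGetD c i 0)],
       acc2.2.1 ++ [(PySem.List.pyGetD c i 0, PySem.List.pyGetD c (i - 1) 0)],
       acc2.2.2.1 ++ [pvDget d (PySem.List.pyGetD c (i - 1) 0, PySem.List.pyGetD c i 0)],
       acc2.2.2.2 ++ [pvDget d (PySem.List.pyGetD c i 0, PySem.List.pyGetD c (i - 1) 0)]))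
    ([], [], [], [])

def pvAStep (d : List (Int × Int × String))
    (acc : List (List (Int × Int)) × List (List (Int × Int)) × List (List (Option String)) × List (List (Option String)))
    (c : List Int) : List (List (Int × Int)) × List (List (Int × Int)) × List (List (Option String)) × List (List (Option String)) :=
  (acc.1 ++ [(pvAInner d c).1 ++ [(PySem.List.pyGetD c (-1) 0, PySem.List.pyGetD c 0 0)]],
   acc.2.1 ++ [(pvAInner d c).2.1 ++ [(PySem.List.pyGetD c 0 0, PySem.List.pyGetD c (-1) 0)]],
   acc.2.2.1 ++ [(pvAInner d c).2.2.1 ++ [pvDget d (PySem.List.pyGetD c (-1) 0, PySem.List.pyGetD c 0 0)]],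
   acc.2.2.2 ++ [(pvAInner d c).2.2.2 ++ [pvDget d (PySem.List.pyGetD c 0 0, PySem.List.pyGetD c (-1) 0)]])

theorem pvAUnfold (cl : List (List Int)) (d : List (Int × Int × String)) :
    get_cycle_labels_edges cl d
      = (PySem.List.pyRange 0 (cl.length : Int) 1).foldl
          (fun acc j => pvAStep d acc (PySem.List.pyGetD cl j [])) ([], [], [], []) := rfl

-- a loop that appends one element to each of four lists is four maps
theorem pvFoldl4 {α β1 β2 β3 β4 : Type} (l : List α) (F1 : α → β1) (F2 : α → β2) (F3 : α → β3) (F4 : α → β4)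
    (a : List β1) (b : List β2) (e : List β3) (f : List β4) :
    l.foldl (fun acc x => (acc.1 ++ [F1 x], acc.2.1 ++ [F2 x], acc.2.2.1 ++ [F3 x], acc.2.2.2 ++ [F4 x])) (a, b, e, f)
      = (a ++ l.map F1, b ++ l.map F2, e ++ l.map F3, f ++ l.map F4) := by
  induction l generalizing a b e f with
  | nil => simp
  | cons x xs ih => simp [ih]

theorem pvZipAux (xs : List Int) (x : Int) :
    (List.range xs.length).map (fun k => ((x :: xs).getD k 0, xs.getD k 0)) = (x :: xs).zip xs := by
  induction xs generalizing x with
  | nil => simp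
  | cons y ys ih =>
    rw [List.length_cons, List.range_succ_eq_map]
    simp only [List.map_cons, List.map_map]
    have : ((fun k => ((x :: y :: ys).getD k 0, (y :: ys).getD k 0)) ∘ Nat.succ)
        = (fun k => ((y :: ys).getD k 0, ys.getD k 0)) := by
      funext k; simp
    rw [this, ih y]
    simp [List.zip]

theorem pvRangeZip (c : List Int) :
    (PySem.List.pyRange 1 (c.length : Int) 1).map
      (fun i => (PySem.List.pyGetD c (i - 1) 0, PySem.List.pyGetD c i 0)) = c.zip (c.drop 1) := by
  cases c with
  | nil => simp [PySem.List.pyRange_one_eq_nil]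
  | cons x xs =>
    rw [PySem.List.pyRange_one]
    have hlen : (((x :: xs).length : Int) - 1).toNat = xs.length := by simp
    rw [hlen, List.map_map]
    have : ((fun i => (PySem.List.pyGetD (x :: xs) (i - 1) 0, PySem.List.pyGetD (x :: xs) i 0)) ∘ (fun k : Nat => (1 : Int) + k))
        = (fun k : Nat => ((x :: xs).getD k 0, xs.getD k 0)) := by
      funext k
      have h1 : (1 : Int) + (k : Int) - 1 = (k : Int) := by ring
      have h2 : (1 : Int) + (k : Int) = ((k + 1 : Nat) : Int) := by push_cast; ring
      simp only [Function.comp, h2, PySem.List.pyGetD_natCast]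
      simp
    rw [this, pvZipAux]
    simp

theorem pvGetNegOne (x : Int) (xs : List Int) :
    PySem.List.pyGetD (x :: xs) (-1) 0 = xs.getLastD x := by
  rw [PySem.List.pyGetD_neg_one (x :: xs) 0 (List.cons_ne_nil x xs)]
  exact List.getLast_eq_getLastD _

-- B's recursive constructor in closed zip form
theorem pvCycleEdges_eq (f a : Int) (rest : List Int) :
    pvCycleEdges f (a :: rest) = (a :: rest).zip rest ++ [(rest.getLastD a, f)] := by
  induction rest generalizing a with
  | nil => simp [pvCycleEdges]
  | cons b rs ih =>
    rw [pvCycleEdges, ih b, List.zip_cons_cons, List.getLastD_cons]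
    rfl

-- per-cycle: A's forward edge list equals B's recursively built one (nonempty cycle)
theorem pvFwdEq (c : List Int) (hc : c ≠ []) :
    c.zip (c.drop 1) ++ [(PySem.List.pyGetD c (-1) 0, PySem.List.pyGetD c 0 0)]
      = pvCycleEdges (PySem.List.pyGetD c 0 0) c := by
  cases c with
  | nil => exact absurd rfl hc
  | cons x xs =>
    rw [PySem.List.pyGetD_zero_cons, pvCycleEdges_eq, pvGetNegOne]
    simp

theorem pvAInner_eq (d : List (Int × Int × String)) (c : List Int) :
    pvAInner d c
      = (c.zip (c.drop 1),
         (c.zip (c.drop 1)).map (fun e => (e.2, e.1)),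
         (c.zip (c.drop 1)).map (pvDget d),
         ((c.zip (c.drop 1)).map (fun e => (e.2, e.1))).map (pvDget d)) := by
  refine Eq.trans
    (pvFoldl4 (PySem.List.pyRange 1 (c.length : Int) 1)
      (fun i => (PySem.List.pyGetD c (i - 1) 0, PySem.List.pyGetD c i 0))
      (fun i => (PySem.List.pyGetD c i 0, PySem.List.pyGetD c (i - 1) 0))
      (fun i => pvDget d (PySem.List.pyGetD c (i - 1) 0, PySem.List.pyGetD c i 0))
      (fun i => pvDget d (PySem.List.pyGetD c i 0, PySem.List.pyGetD c (i - 1) 0)) [] [] [] []) ?_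
  have h1 := pvRangeZip c
  have h2 : (PySem.List.pyRange 1 (c.length : Int) 1).map
      (fun i => (PySem.List.pyGetD c i 0, PySem.List.pyGetD c (i - 1) 0))
      = (c.zip (c.drop 1)).map (fun e => (e.2, e.1)) := by
    rw [← h1, List.map_map]; rfl
  have h3 : (PySem.List.pyRange 1 (c.length : Int) 1).map
      (fun i => pvDget d (PySem.List.pyGetD c (i - 1) 0, PySem.List.pyGetD c i 0))
      = (c.zip (c.drop 1)).map (pvDget d) := by
    rw [← h1, List.map_map]; rfl
  have h4 : (PySem.List.pyRange 1 (c.length : Int) 1).map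
      (fun i => pvDget d (PySem.List.pyGetD c i 0, PySem.List.pyGetD c (i - 1) 0))
      = ((c.zip (c.drop 1)).map (fun e => (e.2, e.1))).map (pvDget d) := by
    rw [← h2, List.map_map]; rfl
  simp only [List.nil_append]
  rw [h1, h2, h3, h4]

-- ===== VERDICT (by name: the statement is the Claim_ definition above) =====
theorem get_cycle_labels_edges_spec : Claim_equal_get_cycle_labels_edges := by
  intro cl d _ hpre
  unfold Spec_get_cycle_labels_edges get_cycle_labels_edges_alt
  rw [pvAUnfold,
      PySem.List.foldl_pyRange_zero_pyGetD' cl ([] : List Int) (pvAStep d) ([], [], [], [])]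
  refine Eq.trans
    (pvFoldl4 cl
      (fun c => (pvAInner d c).1 ++ [(PySem.List.pyGetD c (-1) 0, PySem.List.pyGetD c 0 0)])
      (fun c => (pvAInner d c).2.1 ++ [(PySem.List.pyGetD c 0 0, PySem.List.pyGetD c (-1) 0)])
      (fun c => (pvAInner d c).2.2.1 ++ [pvDget d (PySem.List.pyGetD c (-1) 0, PySem.List.pyGetD c 0 0)])
      (fun c => (pvAInner d c).2.2.2 ++ [pvDget d (PySem.List.pyGetD c 0 0, PySem.List.pyGetD c (-1) 0)])
      [] [] [] []) ?_
  simp only [List.nil_append, List.map_map]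
  refine congrArg₂ Prod.mk ?_ (congrArg₂ Prod.mk ?_ (congrArg₂ Prod.mk ?_ ?_)) <;>
    refine List.map_congr_left (fun c hc => ?_) <;>
    (try simp only [Function.comp]) <;>
    rw [pvAInner_eq, ← pvFwdEq c (hpre c hc)] <;>
    simp
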